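-- pv_equiv track=rewrite | github.com/Patkloe/Python | longestpalindrome.py | pallong
-- ===== SOURCE A (Python) =====
-- def isPalindrome(a,b):  # pour checker que nous avons bel et bien un palindrome
--  if a == b:
--   return True
--  return False
--
-- def pallong(tab):
--  deb = 0
--  fin = len(tab) - 1
--  nbre = 0
--  res = []
--  while deb < fin:
--   if isPalindrome(tab[deb],tab[fin]):
--    nbre = nbre + 1 # compte le nombre de fois il valide palindrome
--    deb = deb + 1   # fait avancer deb a la prochaine occurence
--    fin = fin - 1   # fait reculer fin a l'occurence precedente
--   res.append(nbre) # on enregistre le nombre dans le tableau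
--   if not isPalindrome(tab[deb],tab[fin]): # si ce n'est palindrome
--    nbre = 0        # on reinitialise nbre
--    deb = deb + 1   # avance prochaine occurence
--    fin = fin - 1   # recule precente occurence
--  return max(res)   # a la fin on retourne la valeur maximale du tableau des nombres de palindromes trouves
-- ===== SOURCE B (Python) =====
-- def pallong(tab):
--     # Longest run of consecutive matching symmetric pairs, computed as the
--     # largest gap between consecutive mismatch positions.
--     half = len(tab) // 2
--     bad = [i for i in range(half) if tab[i] != tab[len(tab) - 1 - i]]
--     bounds = [-1] + bad + [half]
--     return max(b - a - 1 for a, b in zip(bounds, bounds[1:]))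
-- ===== Notes on version B (the rewrite author's own statement) =====
-- stated objective: alternative
-- what changed: A's stateful two-pointer while loop that appends a running match counter and maxes the list is replaced by a different algorithm: collect the positions of mismatching symmetric pairs and return the largest gap between consecutive mismatch positions (with -1 and n//2 as sentinels); Pre_ excludes lists with fewer than two elements, on which A raises ValueError (max of an empty list).
import Mathlib
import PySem

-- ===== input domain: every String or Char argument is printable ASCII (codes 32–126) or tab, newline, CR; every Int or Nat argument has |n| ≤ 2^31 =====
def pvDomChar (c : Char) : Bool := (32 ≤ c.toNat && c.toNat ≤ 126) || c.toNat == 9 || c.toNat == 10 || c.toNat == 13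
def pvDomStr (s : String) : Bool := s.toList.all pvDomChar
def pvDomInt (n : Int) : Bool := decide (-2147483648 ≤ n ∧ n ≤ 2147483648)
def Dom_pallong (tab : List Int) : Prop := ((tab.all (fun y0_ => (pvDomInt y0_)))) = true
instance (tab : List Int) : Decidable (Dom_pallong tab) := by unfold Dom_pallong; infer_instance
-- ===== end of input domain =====

-- B replaces A's stateful two-pointer streak scan by a different algorithm: collect the
-- mismatch positions, then return the largest gap between consecutive mismatches
-- (objective: alternative; same O(n) cost).

-- ===== PORT A =====
def isPalindromeI (a b : Int) : Bool := if a == b then true else false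

-- Python's while loop; each iteration shrinks fin - deb by at least 2, so a fuel of
-- tab.length (consumed once per iteration) never runs out on the calls pallong makes.
-- Indexing uses pyGetD (in range on every access reached from pallong's initial state).
def pallongLoop (tab : List Int) (fuel : Nat) (deb fin nbre : Int) (res : List Int) : List Int :=
  match fuel with
  | 0 => res
  | fuel + 1 =>
  if _hl : deb < fin then
    if h1 : isPalindromeI (PySem.List.pyGetD tab deb 0) (PySem.List.pyGetD tab fin 0) = true then
      -- nbre += 1; deb += 1; fin -= 1; res.append(nbre); second check on the moved pair
      if ¬ (isPalindromeI (PySem.List.pyGetD tab (deb + 1) 0) (PySem.List.pyGetD tab (fin - 1) 0) = true) then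
        pallongLoop tab fuel (deb + 2) (fin - 2) 0 (res ++ [nbre + 1])
      else
        pallongLoop tab fuel (deb + 1) (fin - 1) (nbre + 1) (res ++ [nbre + 1])
    else
      -- res.append(nbre); second check re-reads the same (unmoved) pair
      if h2 : ¬ (isPalindromeI (PySem.List.pyGetD tab deb 0) (PySem.List.pyGetD tab fin 0) = true) then
        pallongLoop tab fuel (deb + 1) (fin - 1) 0 (res ++ [nbre])
      else
        pallongLoop tab fuel deb fin nbre (res ++ [nbre])  -- unreachable (h1 contradicts h2)
  else res

def pallong (tab : List Int) : Int :=
  let res := pallongLoop tab tab.length 0 ((tab.length : Int) - 1) 0 []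
  match PySem.List.max? res (fun y => y) with
  | some m => m
  | none => 0   -- Python: max([]) raises ValueError; excluded by Pre_pallong

-- ===== PORT B =====
def pallong_alt (tab : List Int) : Int :=
  let n : Int := (tab.length : Int)
  let half := PySem.Int.floordiv n 2
  let bad := (PySem.List.pyRange 0 half 1).filter
      (fun i => !(PySem.List.pyGetD tab i 0 == PySem.List.pyGetD tab (n - 1 - i) 0))
  let bounds := [(-1 : Int)] ++ bad ++ [half]
  let gaps := (List.zip bounds (PySem.List.slice bounds (some 1) none)).map
      (fun ab => ab.2 - ab.1 - 1)
  match PySem.List.max? gaps (fun y => y) with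
  | some m => m
  | none => 0   -- unreachable: bounds always has at least two elements

-- ===== PRECONDITION & SPEC =====
-- A raises ValueError (max of the empty res list) exactly when len(tab) < 2; excluded here.
def Pre_pallong (tab : List Int) : Prop := 2 ≤ tab.length
instance (tab : List Int) : Decidable (Pre_pallong tab) := by unfold Pre_pallong; infer_instance
def pvWitness_pallong : List Int := [1, 2, 1]

def Spec_pallong (tab : List Int) (out : Int) : Prop := out = pallong_alt tab
instance (tab : List Int) (out : Int) : Decidable (Spec_pallong tab out) := by unfold Spec_pallong; infer_instance

-- ===== CLAIM (what is proved, stated in full; the proofs are below) =====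
def Claim_equal_pallong : Prop := ∀ (tab : List Int), Dom_pallong tab → Pre_pallong tab → Spec_pallong tab (pallong tab)

-- ===== LEMMAS AND PROOFS =====

-- the match indicator of pair j
def mAt (tab : List Int) (j : Nat) : Bool :=
  tab.getD j 0 == tab.getD (tab.length - 1 - j) 0

-- the suffix of the match list from pair j on
def msFrom (tab : List Int) (j : Nat) : List Bool :=
  (List.range (tab.length / 2 - j)).map (fun t => mAt tab (j + t))

-- abstract shape of A's while loop over the match list
def loopA (ms : List Bool) (nbre : Int) : List Int :=
  match ms with
  | [] => []
  | m :: rest =>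
      if m then
        match rest with
        | [] => [nbre + 1]
        | m' :: rest' =>
            if m' then (nbre + 1) :: loopA (m' :: rest') (nbre + 1)
            else (nbre + 1) :: loopA rest' 0
      else nbre :: loopA rest 0

-- longest-run scan (proof-side common form reached from A's loop)
def runFold (ms : List Bool) (best cur : Int) : Int :=
  match ms with
  | [] => best
  | m :: rest =>
      let cur' := if m then cur + 1 else 0
      let best' := if cur' > best then cur' else best
      runFold rest best' cur'

-- B-side abstractions: positions of mismatches, and the max gap between consecutive ones
def falsePos (ms : List Bool) (j : Int) : List Int :=
  match ms with
  | [] => []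
  | m :: rest => if m then falsePos rest (j + 1) else j :: falsePos rest (j + 1)

def maxGap (p : Int) (idxs : List Int) (e : Int) : Int :=
  match idxs with
  | [] => e - p - 1
  | i :: r => max (i - p - 1) (maxGap i r e)

def gapList (p : Int) (idxs : List Int) (e : Int) : List Int :=
  match idxs with
  | [] => [e - p - 1]
  | i :: r => (i - p - 1) :: gapList i r e

lemma loopA_nil (nbre : Int) : loopA [] nbre = [] := rfl
lemma loopA_single_true (nbre : Int) : loopA [true] nbre = [nbre + 1] := rfl
lemma loopA_true_true (rest' : List Bool) (nbre : Int) :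
    loopA (true :: true :: rest') nbre = (nbre + 1) :: loopA (true :: rest') (nbre + 1) := rfl
lemma loopA_true_false (rest' : List Bool) (nbre : Int) :
    loopA (true :: false :: rest') nbre = (nbre + 1) :: loopA rest' 0 := rfl
lemma loopA_false (rest : List Bool) (nbre : Int) :
    loopA (false :: rest) nbre = nbre :: loopA rest 0 := by cases rest <;> rfl

lemma runFold_true (rest : List Bool) (best cur : Int) :
    runFold (true :: rest) best cur
      = runFold rest (if cur + 1 > best then cur + 1 else best) (cur + 1) := by
  simp [runFold]

lemma runFold_false (rest : List Bool) (best cur : Int) :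
    runFold (false :: rest) best cur
      = runFold rest (if (0 : Int) > best then 0 else best) 0 := by
  simp [runFold]

lemma isPal_eq_beq (a b : Int) : isPalindromeI a b = (a == b) := by
  unfold isPalindromeI
  cases h : a == b <;> simp [h]

lemma msFrom_cons (tab : List Int) (j : Nat) (hj : j < tab.length / 2) :
    msFrom tab j = mAt tab j :: msFrom tab (j + 1) := by
  unfold msFrom
  have h : tab.length / 2 - j = (tab.length / 2 - (j + 1)) + 1 := by omega
  rw [h, List.range_succ_eq_map, List.map_cons, List.map_map]
  simp [Function.comp_def, Nat.add_assoc, Nat.add_comm 1]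

lemma msFrom_nil (tab : List Int) (j : Nat) (hj : ¬ j < tab.length / 2) :
    msFrom tab j = [] := by
  unfold msFrom
  have h : tab.length / 2 - j = 0 := by omega
  simp [h]

lemma pallongLoop_eq_loopA (tab : List Int) : ∀ (fuel j : Nat) (nbre : Int) (res : List Int),
    tab.length / 2 - j ≤ fuel →
    pallongLoop tab fuel (j : Int) ((tab.length : Int) - 1 - (j : Int)) nbre res
      = res ++ loopA (msFrom tab j) nbre := by
  intro fuel
  induction fuel with
  | zero =>
    intro j nbre res hfuel
    rw [msFrom_nil tab j (by omega)]
    simp [pallongLoop, loopA]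
  | succ fuel ih =>
    intro j nbre res hfuel
    by_cases hj : j < tab.length / 2
    case neg =>
      rw [msFrom_nil tab j hj]
      have hng : ¬ ((j : Int) < (tab.length : Int) - 1 - (j : Int)) := by omega
      simp [pallongLoop, hng, loopA]
    case pos =>
      have hguard : (j : Int) < (tab.length : Int) - 1 - (j : Int) := by omega
      simp only [pallongLoop]
      have e1 : ((tab.length : Int) - 1 - (j : Int)) = ((tab.length - 1 - j : Nat) : Int) := by omega
      have e2 : ((tab.length : Int) - 1 - (j : Int) - 1) = ((tab.length - 1 - (j + 1) : Nat) : Int) := by omega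
      have e3 : ((j : Int) + 1) = ((j + 1 : Nat) : Int) := by omega
      have e4 : ((j : Int) + 2) = ((j + 2 : Nat) : Int) := by omega
      have e5 : ((tab.length : Int) - 1 - (j : Int) - 2) = ((tab.length : Int) - 1 - ((j + 2 : Nat) : Int)) := by omega
      have e6 : ((tab.length : Int) - 1 - (j : Int) - 1) = ((tab.length : Int) - 1 - ((j + 1 : Nat) : Int)) := by omega
      rw [msFrom_cons tab j hj]
      by_cases hm : mAt tab j = true
      · have hpal : isPalindromeI (PySem.List.pyGetD tab (j : Int) 0)
            (PySem.List.pyGetD tab ((tab.length : Int) - 1 - (j : Int)) 0) = true := by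
          rw [e1, PySem.List.pyGetD_natCast, PySem.List.pyGetD_natCast, isPal_eq_beq]
          exact hm
        rw [dif_pos hguard, dif_pos hpal, hm]
        by_cases hj1 : j + 1 < tab.length / 2
        · -- next pair is a genuine pair; the peek reads mAt tab (j+1)
          have hpeek : isPalindromeI (PySem.List.pyGetD tab ((j : Int) + 1) 0)
              (PySem.List.pyGetD tab ((tab.length : Int) - 1 - (j : Int) - 1) 0)
              = mAt tab (j + 1) := by
            rw [e3, e2, PySem.List.pyGetD_natCast, PySem.List.pyGetD_natCast, isPal_eq_beq]
            rfl
          rw [msFrom_cons tab (j + 1) hj1]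
          by_cases hm1 : mAt tab (j + 1) = true
          · rw [if_neg (by simp [hpeek, hm1]), e3, e6,
              ih (j + 1) (nbre + 1) (res ++ [nbre + 1]) (by omega),
              msFrom_cons tab (j + 1) hj1, hm1, loopA_true_true]
            simp
          · have hm1' : mAt tab (j + 1) = false := by simpa using hm1
            rw [if_pos (by simp [hpeek, hm1']), e4, e5,
              ih (j + 2) 0 (res ++ [nbre + 1]) (by omega),
              hm1', loopA_true_false]
            simp
        · -- last pair: the moved pair is the middle element or the same pair swapped; always equal
          have hpeek : isPalindromeI (PySem.List.pyGetD tab ((j : Int) + 1) 0)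
              (PySem.List.pyGetD tab ((tab.length : Int) - 1 - (j : Int) - 1) 0) = true := by
            rw [e3, e2, PySem.List.pyGetD_natCast, PySem.List.pyGetD_natCast, isPal_eq_beq]
            rcases (by omega : tab.length = 2 * j + 2 ∨ tab.length = 2 * j + 3) with h | h
            · -- even length: the swapped pair (j+1, j); equal because mAt tab j holds
              have hsw : tab.length - 1 - (j + 1) = j := by omega
              have hm' := hm
              unfold mAt at hm'
              rw [show tab.length - 1 - j = j + 1 from by omega] at hm'
              rw [hsw]
              simp only [beq_iff_eq] at hm' ⊢
              exact hm'.symm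
            · -- odd length: the middle element compared with itself
              rw [show tab.length - 1 - (j + 1) = j + 1 from by omega]
              simp
          rw [if_neg (by simp [hpeek]), e3, e6,
            ih (j + 1) (nbre + 1) (res ++ [nbre + 1]) (by omega),
            msFrom_nil tab (j + 1) (by omega), loopA_single_true, loopA_nil]
          simp
      · have hm' : mAt tab j = false := by simpa using hm
        have hpal : isPalindromeI (PySem.List.pyGetD tab (j : Int) 0)
            (PySem.List.pyGetD tab ((tab.length : Int) - 1 - (j : Int)) 0) = false := by
          rw [e1, PySem.List.pyGetD_natCast, PySem.List.pyGetD_natCast, isPal_eq_beq]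
          exact hm'
        rw [dif_pos hguard, dif_neg (by rw [hpal]; simp), dif_pos (by rw [hpal]; simp), e3, e6,
          ih (j + 1) 0 (res ++ [nbre]) (by omega), hm', loopA_false]
        simp

lemma foldl_max_loopA (ms : List Bool) (best cur : Int) (hb : 0 ≤ best)
    (hc : cur = 0 ∨ ms.headD true = true) :
    List.foldl max best (loopA ms cur) = runFold ms best cur := by
  induction ms generalizing best cur with
  | nil => simp [loopA_nil, runFold]
  | cons m rest ih =>
      have hmax1 : (if cur + 1 > best then cur + 1 else best) = max best (cur + 1) := by
        rw [max_def]; split_ifs <;> omega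
      have h1 : (0 : Int) ≤ max best (cur + 1) := hb.trans (le_max_left _ _)
      by_cases hmt : m = true
      · subst hmt
        match rest with
        | [] =>
            rw [loopA_single_true, runFold_true, hmax1]
            simp [runFold]
        | m' :: rest' =>
            by_cases hm' : m' = true
            · subst hm'
              rw [loopA_true_true, List.foldl_cons, runFold_true, hmax1]
              exact ih (max best (cur + 1)) (cur + 1) h1 (Or.inr rfl)
            · have hm'' : m' = false := by simpa using hm'
              subst hm''
              rw [loopA_true_false, List.foldl_cons, runFold_true, hmax1, runFold_false,
                if_neg (not_lt.mpr h1)]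
              have h2 := ih (max best (cur + 1)) 0 h1 (Or.inl rfl)
              rw [loopA_false, List.foldl_cons, max_eq_left h1, runFold_false,
                if_neg (not_lt.mpr h1)] at h2
              exact h2
      · have hm0 : m = false := by simpa using hmt
        subst hm0
        have hcur : cur = 0 := by
          rcases hc with h | h
          · exact h
          · simp at h
        subst hcur
        rw [loopA_false, List.foldl_cons, max_eq_left hb, runFold_false, if_neg (not_lt.mpr hb)]
        exact ih best 0 hb (Or.inl rfl)

-- the first element of loopA is nbre or nbre + 1
lemma loopA_head (ms : List Bool) (cur : Int) (hne : ms ≠ []) :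
    ∃ h t, loopA ms cur = h :: t ∧ (h = cur ∨ h = cur + 1) := by
  match ms with
  | [] => exact absurd rfl hne
  | m :: rest =>
      by_cases hm : m = true
      · subst hm
        match rest with
        | [] => exact ⟨cur + 1, [], loopA_single_true cur, Or.inr rfl⟩
        | m' :: rest' =>
            by_cases hm' : m' = true
            · subst hm'
              exact ⟨cur + 1, _, loopA_true_true rest' cur, Or.inr rfl⟩
            · have : m' = false := by simpa using hm'
              subst this
              exact ⟨cur + 1, _, loopA_true_false rest' cur, Or.inr rfl⟩
      · have : m = false := by simpa using hm
        subst this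
        exact ⟨cur, _, loopA_false rest cur, Or.inl rfl⟩

-- A's result is the longest-run scan over the match list
lemma pallong_eq_runFold (tab : List Int) (hpre : 2 ≤ tab.length) :
    pallong tab = runFold (msFrom tab 0) 0 0 := by
  unfold pallong
  dsimp only
  have hk : 1 ≤ tab.length / 2 := by omega
  have hloop := pallongLoop_eq_loopA tab tab.length 0 0 []
  simp only [Nat.cast_zero, sub_zero, List.nil_append] at hloop
  rw [hloop (by omega)]
  have hne : msFrom tab 0 ≠ [] := by
    intro h
    have := congrArg List.length h
    simp [msFrom] at this
    omega
  obtain ⟨h, t, hht, hh⟩ := loopA_head (msFrom tab 0) 0 hne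
  rw [hht, PySem.List.max?_id_cons]
  have hfold := foldl_max_loopA (msFrom tab 0) 0 0 (by omega) (Or.inl rfl)
  rw [hht, List.foldl_cons, show max (0:Int) h = h from by omega] at hfold
  exact hfold

-- ===== B-side lemmas =====

-- zip of bounds with its tail, mapped to gaps, is gapList
lemma zip_gaps (idxs : List Int) : ∀ (p e : Int),
    (List.zip (p :: (idxs ++ [e])) (idxs ++ [e])).map (fun ab => ab.2 - ab.1 - 1)
      = gapList p idxs e := by
  induction idxs with
  | nil => intro p e; simp [gapList]
  | cons i r ih =>
      intro p e
      simp only [List.cons_append, List.zip_cons_cons, List.map_cons, gapList]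
      rw [ih i e]

lemma foldl_max_gapList (idxs : List Int) : ∀ (p e b : Int),
    List.foldl max b (gapList p idxs e) = max b (maxGap p idxs e) := by
  induction idxs with
  | nil => intro p e b; simp [gapList, maxGap]
  | cons i r ih =>
      intro p e b
      simp only [gapList, maxGap, List.foldl_cons]
      rw [ih i e]
      rw [max_assoc]

lemma max?_gapList (p e : Int) (idxs : List Int) :
    PySem.List.max? (gapList p idxs e) (fun y => y) = some (maxGap p idxs e) := by
  cases idxs with
  | nil => simp [gapList, maxGap, PySem.List.max?_id_cons]
  | cons i r =>
      simp only [gapList, PySem.List.max?_id_cons, maxGap]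
      rw [foldl_max_gapList]

lemma maxGap_ge (idxs : List Int) : ∀ (p e q : Int), (∀ i ∈ idxs, q ≤ i) → q ≤ e →
    q - p - 1 ≤ maxGap p idxs e := by
  induction idxs with
  | nil => intro p e q _ he; simp [maxGap]; omega
  | cons i r ih =>
      intro p e q hall he
      have hi : q ≤ i := hall i (by simp)
      simp only [maxGap]
      have := le_max_left (i - p - 1) (maxGap i r e)
      omega

lemma falsePos_ge (ms : List Bool) : ∀ (j : Int), ∀ i ∈ falsePos ms j, j ≤ i := by
  induction ms with
  | nil => intro j i hi; simp [falsePos] at hi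
  | cons m rest ih =>
      intro j i hi
      simp only [falsePos] at hi
      by_cases hm : m = true
      · rw [if_pos hm] at hi
        have := ih (j + 1) i hi
        omega
      · rw [if_neg hm] at hi
        rcases List.mem_cons.mp hi with h | h
        · omega
        · have := ih (j + 1) i h
          omega

-- the longest-run scan equals the max gap between mismatch positions
lemma runFold_eq_maxGap (ms : List Bool) : ∀ (j p best : Int), 0 ≤ best → j - p - 1 ≤ best →
    runFold ms best (j - p - 1) = max best (maxGap p (falsePos ms j) (j + ms.length)) := by
  induction ms with
  | nil =>
      intro j p best hb hc
      simp only [falsePos, maxGap, runFold, List.length_nil]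
      rw [max_def]; split_ifs <;> omega
  | cons m rest ih =>
      intro j p best hb hc
      by_cases hm : m = true
      · subst hm
        rw [runFold_true]
        have hmax : (if j - p - 1 + 1 > best then j - p - 1 + 1 else best) = max best (j - p) := by
          rw [max_def]; split_ifs <;> omega
        rw [hmax, show j - p - 1 + 1 = (j + 1) - p - 1 from by omega]
        have h1 : (0 : Int) ≤ max best (j - p) := hb.trans (le_max_left _ _)
        have h2 : (j + 1) - p - 1 ≤ max best (j - p) := by
          have := le_max_right best (j - p); omega
        rw [ih (j + 1) p (max best (j - p)) h1 h2]
        have hG : j - p ≤ maxGap p (falsePos rest (j + 1)) (j + 1 + rest.length) := by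
          have := maxGap_ge (falsePos rest (j + 1)) p (j + 1 + rest.length) (j + 1)
            (falsePos_ge rest (j + 1)) (by omega)
          omega
        simp only [falsePos, reduceIte, List.length_cons]
        push_cast
        rw [show j + ((rest.length : Int) + 1) = j + 1 + (rest.length : Int) from by ring]
        rw [max_def, max_def, max_def]
        split_ifs <;> omega
      · have hm0 : m = false := by simpa using hm
        subst hm0
        rw [runFold_false, if_neg (not_lt.mpr hb),
          show (0 : Int) = (j + 1) - j - 1 from by omega]
        rw [ih (j + 1) j best hb (by omega)]
        simp only [falsePos, Bool.false_eq_true, if_false, maxGap, List.length_cons]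
        push_cast
        rw [show j + ((rest.length : Int) + 1) = j + 1 + (rest.length : Int) from by ring]
        rw [max_def, max_def, max_def]
        split_ifs <;> omega

-- B's filter over range is falsePos over the match list
lemma filter_eq_falsePos (tab : List Int) : ∀ (k j : Nat), j + k ≤ tab.length / 2 →
    ((List.range' j k).map (fun t : Nat => (t : Int))).filter
        (fun i => !(PySem.List.pyGetD tab i 0 == PySem.List.pyGetD tab ((tab.length : Int) - 1 - i) 0))
      = falsePos ((List.range' j k).map (mAt tab)) (j : Int) := by
  intro k
  induction k with
  | zero => intro j _; simp [falsePos]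
  | succ k ih =>
      intro j hjk
      rw [List.range'_succ, List.map_cons, List.map_cons, List.filter_cons]
      have hj : j < tab.length := by omega
      have e1 : ((tab.length : Int) - 1 - (j : Int)) = ((tab.length - 1 - j : Nat) : Int) := by omega
      have hpred : (!(PySem.List.pyGetD tab (j : Int) 0
          == PySem.List.pyGetD tab ((tab.length : Int) - 1 - (j : Int)) 0)) = !(mAt tab j) := by
        rw [e1, PySem.List.pyGetD_natCast, PySem.List.pyGetD_natCast]
        rfl
      have ih' := ih (j + 1) (by omega)
      simp only [falsePos]
      by_cases hm : mAt tab j = true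
      · rw [if_neg (by rw [hpred, hm]; simp), if_pos hm, ih']
        norm_num
      · have hm' : mAt tab j = false := by simpa using hm
        rw [if_pos (by rw [hpred, hm']; simp), if_neg (by simp [hm']), ih']
        norm_num

lemma msFrom_zero (tab : List Int) :
    msFrom tab 0 = (List.range (tab.length / 2)).map (mAt tab) := by
  unfold msFrom
  simp

lemma pallong_alt_eq_maxGap (tab : List Int) :
    pallong_alt tab = maxGap (-1) (falsePos (msFrom tab 0) 0) ((tab.length / 2 : Nat) : Int) := by
  unfold pallong_alt
  dsimp only
  rw [show ((2 : Int)) = ((2 : Nat) : Int) from by norm_num, PySem.Int.floordiv_natCast,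
    PySem.List.pyRange_zero_nat, PySem.List.slice_from_one]
  have hbad : ((List.range (tab.length / 2)).map (fun t : Nat => (t : Int))).filter
      (fun i => !(PySem.List.pyGetD tab i 0 == PySem.List.pyGetD tab ((tab.length : Int) - 1 - i) 0))
      = falsePos (msFrom tab 0) 0 := by
    rw [msFrom_zero, List.range_eq_range']
    simpa using filter_eq_falsePos tab (tab.length / 2) 0 (by omega)
  rw [hbad]
  rw [show ([(-1 : Int)] ++ falsePos (msFrom tab 0) 0 ++ [((tab.length / 2 : Nat) : Int)]).tail
      = falsePos (msFrom tab 0) 0 ++ [((tab.length / 2 : Nat) : Int)] from rfl]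
  rw [show ([(-1 : Int)] ++ falsePos (msFrom tab 0) 0 ++ [((tab.length / 2 : Nat) : Int)])
      = (-1 : Int) :: (falsePos (msFrom tab 0) 0 ++ [((tab.length / 2 : Nat) : Int)]) from by simp]
  rw [zip_gaps, max?_gapList]

-- ===== VERDICT (by name: the statement is the Claim_ definition above) =====
theorem pallong_spec : Claim_equal_pallong := by
  intro tab _ hpre
  unfold Spec_pallong
  have hlen : (msFrom tab 0).length = tab.length / 2 := by
    simp [msFrom]
  rw [pallong_eq_runFold tab hpre, pallong_alt_eq_maxGap tab]
  have hmain := runFold_eq_maxGap (msFrom tab 0) 0 (-1) 0 (by omega) (by omega)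
  rw [show (0 : Int) - (-1) - 1 = 0 from by omega] at hmain
  rw [hmain]
  have hG : 0 ≤ maxGap (-1) (falsePos (msFrom tab 0) 0) (0 + (msFrom tab 0).length) := by
    have := maxGap_ge (falsePos (msFrom tab 0) 0) (-1) (0 + (msFrom tab 0).length) 0
      (falsePos_ge (msFrom tab 0) 0) (by omega)
    omega
  rw [max_eq_right hG, show ((0 : Int) + (msFrom tab 0).length) = (((tab.length / 2 : Nat)) : Int)
    from by rw [hlen]; omega]
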